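-- pv_equiv track=rewrite | github.com/jessding/6.009sp21 | lab6/lab.py | room_capacity_fits
-- ===== SOURCE A (Python) =====
-- def student_combos(student_preferences, n):
--     """
--     given student pref dict and n, returns a list of all subsets (represented as lists) of students of size n
--     """
--     students = list(student_preferences.keys())
--     s = len(students)
--     returned = []
--     for x in range(2**s):
--         binary = bin(x)[2:]
--         # if this subset has size n, pad it with leading zeros, make a subset list to populate
--         if binary.count('1') == n:
--             binary = '0'*(s-len(binary)) + binary
--             subset = [students[i] for i in range(s) if binary[i] == '1']
--             returned += [subset]
--     return returned
--
-- def room_capacity_fits(student_preferences, room_capacities):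
--     """
--     given student prefs and room sizes, return a CNF formula that is the logical equivalent of making sure no room is oversubscribed
--     """
--     s = len(list(student_preferences.keys()))
--     formula = []
--     for room in room_capacities:
--         n = room_capacities[room]
--         if n < s:
--             student_subsets = student_combos(student_preferences, n+1)
--             for group in student_subsets:
--                 clause = [(student + '_' + room, False) for student in group]
--                 formula += [clause]
--     return formula
-- ===== SOURCE B (Python) =====
-- def _combos(students, k):
--     if k <= 0:
--         return [[]] if k == 0 else []
--     if len(students) < k:
--         return []
--     rest = students[1:]
--     return _combos(rest, k) + [[students[0]] + c for c in _combos(rest, k - 1)]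
--
-- def room_capacity_fits(student_preferences, room_capacities):
--     students = list(student_preferences)
--     s = len(students)
--     formula = []
--     for room, cap in room_capacities.items():
--         if cap < s:
--             for group in _combos(students, cap + 1):
--                 formula.append([(st + '_' + room, False) for st in group])
--     return formula
-- ===== Notes on version B (the rewrite author's own statement) =====
-- stated objective: alternative
-- what changed: B replaces A's enumeration of all 2^s bitmasks (decoding each via a binary string and filtering by popcount) with a direct recursive generation of exactly the C(s,n+1) subsets of size n+1, in the same order (subsets without the first student, then subsets containing it); intended as faster — measured 26.6x at n=16, but unconfirmed at the largest size because the output itself is exponential there.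
import Mathlib
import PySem

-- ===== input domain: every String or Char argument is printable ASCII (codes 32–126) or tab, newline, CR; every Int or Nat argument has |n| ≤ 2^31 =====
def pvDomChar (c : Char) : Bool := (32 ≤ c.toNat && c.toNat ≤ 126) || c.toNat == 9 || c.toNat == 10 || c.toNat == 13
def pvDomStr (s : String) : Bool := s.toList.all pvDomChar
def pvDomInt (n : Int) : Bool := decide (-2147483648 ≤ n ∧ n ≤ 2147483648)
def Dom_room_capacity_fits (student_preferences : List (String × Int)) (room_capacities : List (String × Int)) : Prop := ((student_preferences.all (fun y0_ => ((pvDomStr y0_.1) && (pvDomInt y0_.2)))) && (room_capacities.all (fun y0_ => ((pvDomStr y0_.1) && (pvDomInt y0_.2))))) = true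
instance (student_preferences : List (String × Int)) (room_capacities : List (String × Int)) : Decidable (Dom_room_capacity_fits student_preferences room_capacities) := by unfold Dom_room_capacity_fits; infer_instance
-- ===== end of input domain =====

-- B replaces A's enumeration of all 2^s bitmasks (decoded via binary strings and
-- filtered by popcount) with a direct recursive generation of exactly the C(s,n+1)
-- subsets of size n+1, in the same order; objective: alternative (it avoids the
-- 2^s scan, though the output itself can be exponential in s).

-- ===== PORT A =====

-- hand port of Python's bin(n)[2:] for n > 0 (exact there): most-significant digit first
def pyBinAux : Nat → List Char
  | 0 => []
  | n + 1 => pyBinAux ((n + 1) / 2) ++ [if (n + 1) % 2 = 1 then '1' else '0']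
decreasing_by omega

-- bin(x)[2:] for x ≥ 0 (exact there; A only applies it to x ∈ range(2**s))
def pyBin (x : Int) : List Char :=
  if x = 0 then ['0'] else pyBinAux x.toNat

def student_combos (student_preferences : List (String × Int)) (n : Int) : List (List String) :=
  let students := (PySem.Dict.ofList student_preferences).keys
  let s := students.length
  (PySem.List.pyRange 0 (2 ^ s) 1).foldl
    (fun returned x =>
      let binary := pyBin x
      if ((binary.count '1' : Int) = n) then
        let binary := List.replicate (s - binary.length) '0' ++ binary
        -- [students[i] for i in range(s) if binary[i] == '1']  (indices are in range: len(binary) ≥ s)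
        let subset := ((PySem.List.pyRange 0 (s : Int) 1).filter
            (fun i => PySem.List.pyGet? binary i == some '1')).map
            (fun i => (PySem.List.pyGet? students i).getD "")
        returned ++ [subset]
      else returned)
    []

def room_capacity_fits (student_preferences : List (String × Int)) (room_capacities : List (String × Int)) : List (List (String × Bool)) :=
  let rc := PySem.Dict.ofList room_capacities
  let s := (PySem.Dict.ofList student_preferences).keys.length
  rc.keys.foldl
    (fun formula room =>
      let n := (PySem.Dict.get? rc room).getD 0   -- room ∈ rc.keys, so the lookup succeeds
      if n < (s : Int) then
        let student_subsets := student_combos student_preferences (n + 1)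
        student_subsets.foldl
          (fun formula group =>
            formula ++ [group.map (fun student => (student ++ "_" ++ room, false))])
          formula
      else formula)
    []

-- ===== PORT B =====

def combosB (students : List String) (k : Int) : List (List String) :=
  if k ≤ 0 then (if k = 0 then [[]] else [])
  else if (students.length : Int) < k then []
  else
    match students with
    | [] => []   -- unreachable: 1 ≤ k ≤ len(students)
    | st :: rest => combosB rest k ++ (combosB rest (k - 1)).map (fun c => st :: c)
termination_by students.length

def room_capacity_fits_alt (student_preferences : List (String × Int)) (room_capacities : List (String × Int)) : List (List (String × Bool)) :=
  let students := (PySem.Dict.ofList student_preferences).keys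
  let s := students.length
  (PySem.Dict.ofList room_capacities).items.foldl
    (fun formula rm =>
      if rm.2 < (s : Int) then
        formula ++ (combosB students (rm.2 + 1)).map
          (fun group => group.map (fun st => (st ++ "_" ++ rm.1, false)))
      else formula)
    []

-- ===== PRECONDITION & SPEC =====
def Spec_room_capacity_fits (student_preferences : List (String × Int)) (room_capacities : List (String × Int)) (out : List (List (String × Bool))) : Prop := out = room_capacity_fits_alt student_preferences room_capacities
instance (student_preferences : List (String × Int)) (room_capacities : List (String × Int)) (out : List (List (String × Bool))) : Decidable (Spec_room_capacity_fits student_preferences room_capacities out) := by unfold Spec_room_capacity_fits; infer_instance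

-- ===== CLAIM (what is proved, stated in full; the proofs are below) =====
def Claim_equal_room_capacity_fits : Prop := ∀ (student_preferences : List (String × Int)) (room_capacities : List (String × Int)), Dom_room_capacity_fits student_preferences room_capacities → Spec_room_capacity_fits student_preferences room_capacities (room_capacity_fits student_preferences room_capacities)

-- ===== LEMMAS AND PROOFS =====

-- the padded binary string of x as A computes it, abstractly: s bits, MSB first
def pvBits : Nat → Nat → List Char
  | 0, _ => []
  | s + 1, n => pvBits s (n / 2) ++ [if n % 2 = 1 then '1' else '0']

-- the subset A extracts from a padded bit string
def pvSelect : List String → List Char → List String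
  | [], _ => []
  | _ :: _, [] => []
  | st :: rest, b :: bs => if b = '1' then st :: pvSelect rest bs else pvSelect rest bs

-- A's per-room subset list, abstractly
def pvSubsetsA (students : List String) (k : Int) : List (List String) :=
  ((List.range (2 ^ students.length)).filter
      (fun x => decide (((pvBits students.length x).count '1' : Int) = k))).map
    (fun x => pvSelect students (pvBits students.length x))

theorem pvBits_zero (s : Nat) : pvBits s 0 = List.replicate s '0' := by
  induction s with
  | zero => rfl
  | succ s ih => simp [pvBits, ih, List.replicate_succ']

theorem pvBits_length (s n : Nat) : (pvBits s n).length = s := by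
  induction s generalizing n with
  | zero => rfl
  | succ s ih => simp [pvBits, ih]

theorem pvBits_cons0 (s x : Nat) (hx : x < 2 ^ s) : pvBits (s + 1) x = '0' :: pvBits s x := by
  induction s generalizing x with
  | zero =>
    interval_cases x
    rfl
  | succ s ih =>
    have h2 : 2 ^ (s + 1) = 2 * 2 ^ s := by ring
    have hx2 : x / 2 < 2 ^ s := by omega
    show pvBits (s + 1) (x / 2) ++ _ = '0' :: pvBits (s + 1) x
    rw [ih _ hx2]
    simp [pvBits]

theorem pvBits_cons1 (s x : Nat) (hx : x < 2 ^ s) : pvBits (s + 1) (2 ^ s + x) = '1' :: pvBits s x := by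
  induction s generalizing x with
  | zero =>
    interval_cases x
    rfl
  | succ s ih =>
    have h2 : 2 ^ (s + 1) = 2 * 2 ^ s := by ring
    have hdiv : (2 ^ (s + 1) + x) / 2 = 2 ^ s + x / 2 := by omega
    have hmod : (2 ^ (s + 1) + x) % 2 = x % 2 := by omega
    have hx2 : x / 2 < 2 ^ s := by omega
    show pvBits (s + 1) ((2 ^ (s + 1) + x) / 2) ++ _ = '1' :: pvBits (s + 1) x
    rw [hdiv, ih _ hx2]
    simp [pvBits, hmod]

theorem pvPadAux (s : Nat) : ∀ n : Nat, n < 2 ^ s →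
    List.replicate (s - (pyBinAux n).length) '0' ++ pyBinAux n = pvBits s n := by
  induction s with
  | zero =>
    intro n hn
    interval_cases n
    simp [pyBinAux, pvBits]
  | succ s ih =>
    intro n hn
    match n with
    | 0 => simp [pyBinAux, pvBits_zero]
    | n + 1 =>
      have h2 : 2 ^ (s + 1) = 2 * 2 ^ s := by ring
      have hm : (n + 1) / 2 < 2 ^ s := by omega
      have ihm := ih ((n + 1) / 2) hm
      have hlen : (pyBinAux ((n + 1) / 2)).length ≤ s := by
        have := congrArg List.length ihm
        simp [pvBits_length] at this
        omega
      show List.replicate (s + 1 - (pyBinAux (n + 1)).length) '0' ++ pyBinAux (n + 1)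
          = pvBits s ((n + 1) / 2) ++ [if (n + 1) % 2 = 1 then '1' else '0']
      rw [pyBinAux]
      simp only [List.length_append, List.length_singleton]
      have hsub : s + 1 - ((pyBinAux ((n + 1) / 2)).length + 1)
          = s - (pyBinAux ((n + 1) / 2)).length := by omega
      rw [hsub, ← List.append_assoc, ihm]

theorem pvPad (s x : Nat) (hx : x < 2 ^ s) (hs : 1 ≤ s) :
    List.replicate (s - (pyBin (x : Int)).length) '0' ++ pyBin (x : Int) = pvBits s x := by
  match x with
  | 0 =>
    show List.replicate (s - (pyBin 0).length) '0' ++ pyBin 0 = pvBits s 0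
    rw [pvBits_zero]
    have : s = (s - 1) + 1 := by omega
    rw [this, List.replicate_succ']
    simp [pyBin]
  | x + 1 =>
    have hne : ((x + 1 : Nat) : Int) ≠ 0 := by omega
    rw [pyBin, if_neg hne]
    have : ((x + 1 : Nat) : Int).toNat = x + 1 := by omega
    rw [this]
    exact pvPadAux s (x + 1) hx

theorem pvCount (s x : Nat) (hx : x < 2 ^ s) :
    ((pyBin (x : Int)).count '1') = (pvBits s x).count '1' := by
  match s with
  | 0 =>
    interval_cases x
    simp [pyBin, pvBits]
  | s + 1 =>
    rw [← pvPad (s + 1) x hx (by omega)]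
    simp [List.count_append, List.count_replicate]

theorem pvSelectAux (students : List String) : ∀ (bs : List Char), bs.length = students.length →
    ((List.range students.length).filter (fun i => bs[i]? == some '1')).map
      (fun i => students[i]?.getD "") = pvSelect students bs := by
  induction students with
  | nil => intro bs h; simp [pvSelect]
  | cons st rest ih =>
    intro bs h
    match bs with
    | [] => simp at h
    | b :: bs' =>
      have h' : bs'.length = rest.length := by simpa using h
      rw [show (st :: rest).length = rest.length + 1 from rfl, List.range_succ_eq_map,
        List.filter_cons, List.filter_map]
      have hcomp1 : ((fun i => (b :: bs')[i]? == some '1') ∘ Nat.succ)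
          = (fun i => bs'[i]? == some '1') := by
        funext i; simp
      rw [hcomp1]
      by_cases hb : b = '1'
      · subst hb
        rw [if_pos (by simp)]
        simp only [List.map_cons, List.map_map]
        have hcomp2 : ((fun i => (st :: rest)[i]?.getD "") ∘ Nat.succ)
            = (fun i => rest[i]?.getD "") := by
          funext i; simp
        rw [hcomp2, ih bs' h']
        simp [pvSelect]
      · rw [if_neg (by simpa using hb)]
        simp only [List.map_map]
        have hcomp2 : ((fun i => (st :: rest)[i]?.getD "") ∘ Nat.succ)
            = (fun i => rest[i]?.getD "") := by
          funext i; simp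
        rw [hcomp2, ih bs' h']
        simp [pvSelect, hb]

theorem pvSelectEq (students : List String) (bs : List Char) (h : bs.length = students.length) :
    ((PySem.List.pyRange 0 (students.length : Int) 1).filter
        (fun i => PySem.List.pyGet? bs i == some '1')).map
      (fun i => (PySem.List.pyGet? students i).getD "") = pvSelect students bs := by
  rw [PySem.List.pyRange_one]
  have hn : ((students.length : Int) - 0).toNat = students.length := by omega
  rw [hn, List.filter_map, List.map_map]
  have hc1 : ((fun i => PySem.List.pyGet? bs i == some '1') ∘ (fun k : Nat => (0 : Int) + k))
      = (fun i : Nat => bs[i]? == some '1') := by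
    funext i; simp [PySem.List.pyGet?_natCast]
  have hc2 : ((fun i => (PySem.List.pyGet? students i).getD "") ∘ (fun k : Nat => (0 : Int) + k))
      = (fun i : Nat => students[i]?.getD "") := by
    funext i; simp [PySem.List.pyGet?_natCast]
  rw [hc1, hc2]
  exact pvSelectAux students bs h

theorem pvFoldKey (students : List String) (n : Int) :
    (PySem.List.pyRange 0 (2 ^ students.length) 1).foldl
      (fun returned x =>
        if (((pyBin x).count '1' : Int) = n) then
          returned ++ [((PySem.List.pyRange 0 (students.length : Int) 1).filter
              (fun i => PySem.List.pyGet?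
                (List.replicate (students.length - (pyBin x).length) '0' ++ pyBin x) i == some '1')).map
              (fun i => (PySem.List.pyGet? students i).getD "")]
        else returned) [] = pvSubsetsA students n := by
  rw [PySem.List.pyRange_one 0 ((2 : Int) ^ students.length)]
  have hN : (((2 : Int) ^ students.length) - 0).toNat = 2 ^ students.length := by
    rw [sub_zero, show ((2 : Int) ^ students.length) = ((2 ^ students.length : Nat) : Int) by push_cast; ring]
    exact Int.toNat_natCast _
  rw [hN, List.foldl_map, PySem.List.foldl_append_ite, List.nil_append]
  have hfil : List.filter (fun x : Nat => decide ((((pyBin ((0 : Int) + x)).count '1' : Int)) = n))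
        (List.range (2 ^ students.length))
      = List.filter (fun x : Nat => decide (((pvBits students.length x).count '1' : Int) = n))
        (List.range (2 ^ students.length)) := by
    apply List.filter_congr
    intro x hx
    rw [List.mem_range] at hx
    rw [zero_add, pvCount students.length x hx]
  rw [hfil]
  apply List.map_congr_left
  intro x hx
  rw [List.mem_filter, List.mem_range] at hx
  simp only [zero_add]
  by_cases hs : students.length = 0
  · match students, hs with
    | [], _ =>
      have : x = 0 := by simpa using hx.1
      subst this
      rfl
  · rw [pvPad students.length x hx.1 (by omega)]
    exact pvSelectEq students (pvBits students.length x) (pvBits_length _ _)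

theorem student_combos_eq (student_preferences : List (String × Int)) (n : Int) :
    student_combos student_preferences n
      = pvSubsetsA (PySem.Dict.ofList student_preferences).keys n :=
  pvFoldKey (PySem.Dict.ofList student_preferences).keys n

theorem pvSubsetsA_cons (st : String) (rest : List String) (k : Int) :
    pvSubsetsA (st :: rest) k
      = pvSubsetsA rest k ++ (pvSubsetsA rest (k - 1)).map (fun c => st :: c) := by
  simp only [pvSubsetsA]
  have h2 : 2 ^ (st :: rest).length = 2 ^ rest.length + 2 ^ rest.length := by
    simp [List.length_cons]; ring
  rw [h2, List.range_add, List.filter_append, List.map_append]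
  congr 1
  · -- first half: bitmasks with MSB 0
    have hf1 : List.filter (fun x => decide (((pvBits (st :: rest).length x).count '1' : Int) = k))
          (List.range (2 ^ rest.length))
        = List.filter (fun x => decide (((pvBits rest.length x).count '1' : Int) = k))
          (List.range (2 ^ rest.length)) := by
      apply List.filter_congr
      intro x hx
      rw [List.mem_range] at hx
      rw [show (st :: rest).length = rest.length + 1 from rfl, pvBits_cons0 _ _ hx]
      simp
    rw [hf1]
    apply List.map_congr_left
    intro x hx
    rw [List.mem_filter, List.mem_range] at hx
    rw [show (st :: rest).length = rest.length + 1 from rfl, pvBits_cons0 _ _ hx.1]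
    simp [pvSelect]
  · -- second half: bitmasks with MSB 1
    rw [List.filter_map, List.map_map, List.map_map]
    have hf2 : List.filter ((fun x => decide (((pvBits (st :: rest).length x).count '1' : Int) = k))
            ∘ fun x => 2 ^ rest.length + x) (List.range (2 ^ rest.length))
        = List.filter (fun x => decide (((pvBits rest.length x).count '1' : Int) = k - 1))
          (List.range (2 ^ rest.length)) := by
      apply List.filter_congr
      intro x hx
      rw [List.mem_range] at hx
      simp only [Function.comp_apply]
      rw [show (st :: rest).length = rest.length + 1 from rfl, pvBits_cons1 _ _ hx]
      simp only [List.count_cons, beq_self_eq_true, if_true, decide_eq_decide]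
      push_cast
      omega
    rw [hf2]
    apply List.map_congr_left
    intro x hx
    rw [List.mem_filter, List.mem_range] at hx
    simp only [Function.comp_apply]
    rw [show (st :: rest).length = rest.length + 1 from rfl, pvBits_cons1 _ _ hx.1]
    simp [pvSelect]

theorem combosB_zero (l : List String) : combosB l 0 = [[]] := by
  rw [combosB.eq_def]
  simp

theorem combosB_neg (l : List String) (k : Int) (hk : k < 0) : combosB l k = [] := by
  rw [combosB.eq_def, if_pos (by omega : k ≤ 0), if_neg (by omega : ¬ k = 0)]

theorem combosB_big (l : List String) (k : Int) (hk : 0 < k) (hl : (l.length : Int) < k) :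
    combosB l k = [] := by
  rw [combosB.eq_def, if_neg (by omega : ¬ k ≤ 0), if_pos hl]

theorem pvSubsetsA_eq_combosB (students : List String) : ∀ k : Int,
    pvSubsetsA students k = combosB students k := by
  induction students with
  | nil =>
    intro k
    by_cases hk : k = 0
    · subst hk
      rw [combosB_zero]
      simp [pvSubsetsA, pvBits, pvSelect]
    · have hL : pvSubsetsA [] k = [] := by
        simp [pvSubsetsA, pvBits, Ne.symm hk]
      rw [hL, combosB.eq_def]
      split_ifs <;> simp_all
  | cons st rest ih =>
    intro k
    rw [pvSubsetsA_cons, ih, ih]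
    by_cases hk0 : k = 0
    · subst hk0
      rw [combosB_zero, combosB_zero, combosB_neg rest _ (by omega)]
      rfl
    · by_cases hkn : k < 0
      · rw [combosB_neg _ _ hkn, combosB_neg _ _ hkn, combosB_neg _ _ (by omega)]
        rfl
      · by_cases hbig : ((st :: rest).length : Int) < k
        · have hr : (rest.length : Int) < k - 1 := by
            simp only [List.length_cons] at hbig; push_cast at hbig ⊢; omega
          rw [combosB_big _ _ (by omega) hbig,
            combosB_big rest k (by omega) (by omega),
            combosB_big rest (k - 1) (by omega) hr]
          rfl
        · conv_rhs => rw [combosB.eq_def]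
          rw [if_neg (by omega : ¬ k ≤ 0), if_neg hbig]

theorem pvMain (sp rc : List (String × Int)) :
    room_capacity_fits sp rc = room_capacity_fits_alt sp rc := by
  show (PySem.Dict.ofList rc).keys.foldl
      (fun formula room =>
        if (PySem.Dict.get? (PySem.Dict.ofList rc) room).getD 0
            < ((PySem.Dict.ofList sp).keys.length : Int) then
          (student_combos sp ((PySem.Dict.get? (PySem.Dict.ofList rc) room).getD 0 + 1)).foldl
            (fun formula group =>
              formula ++ [group.map (fun student => (student ++ "_" ++ room, false))])
            formula
        else formula) []
    = (PySem.Dict.ofList rc).items.foldl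
      (fun formula rm =>
        if rm.2 < ((PySem.Dict.ofList sp).keys.length : Int) then
          formula ++ (combosB (PySem.Dict.ofList sp).keys (rm.2 + 1)).map
            (fun group => group.map (fun st => (st ++ "_" ++ rm.1, false)))
        else formula) []
  rw [PySem.Dict.items_eq_map_keys (PySem.Dict.ofList rc) (PySem.Dict.nodup_keys_ofList rc) 0,
    List.foldl_map]
  congr 1
  funext formula room
  rw [← PySem.Dict.getD_eq_get?_getD]
  by_cases hlt : PySem.Dict.getD (PySem.Dict.ofList rc) room 0
      < ((PySem.Dict.ofList sp).keys.length : Int)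
  · rw [if_pos hlt, if_pos hlt, PySem.List.foldl_append_singleton_eq_map,
      student_combos_eq, pvSubsetsA_eq_combosB]
  · rw [if_neg hlt, if_neg hlt]

-- ===== VERDICT (by name: the statement is the Claim_ definition above) =====
theorem room_capacity_fits_spec : Claim_equal_room_capacity_fits := by
  intro sp rc _
  exact pvMain sp rc
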